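-- pv_equiv track=rewrite | github.com/van-1997/selenium_lesson | function1.py | max_school
-- ===== SOURCE A (Python) =====
-- def max_school(kwargs):
--     max_num = 1
--     max_name = ""
--     for key, val in kwargs.items():
--         max1 = max(val)
--         if max1 > max_num:
--             max_num = max1
--             max_name = key
--
--     return (max_name, max_num)
-- ===== SOURCE B (Python) =====
-- def max_school(kwargs):
--     maxes = {key: max(val) for key, val in kwargs.items()}
--     best = max(maxes.values(), default=None)
--     if best is None or best <= 1:
--         return ("", 1)
--     for key, m in maxes.items():
--         if m == best:
--             return (key, best)
-- ===== Notes on version B (the rewrite author's own statement) =====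
-- stated objective: alternative
-- what changed: Replaces the single running-(name,max) accumulator loop by a different decomposition: build a table of per-key maxima, reduce it to the global best in a separate pass, then look up the first key attaining it (first-occurrence tie-breaking and the sentinel for a best not above the initial threshold fall out of the structure).
import Mathlib
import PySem

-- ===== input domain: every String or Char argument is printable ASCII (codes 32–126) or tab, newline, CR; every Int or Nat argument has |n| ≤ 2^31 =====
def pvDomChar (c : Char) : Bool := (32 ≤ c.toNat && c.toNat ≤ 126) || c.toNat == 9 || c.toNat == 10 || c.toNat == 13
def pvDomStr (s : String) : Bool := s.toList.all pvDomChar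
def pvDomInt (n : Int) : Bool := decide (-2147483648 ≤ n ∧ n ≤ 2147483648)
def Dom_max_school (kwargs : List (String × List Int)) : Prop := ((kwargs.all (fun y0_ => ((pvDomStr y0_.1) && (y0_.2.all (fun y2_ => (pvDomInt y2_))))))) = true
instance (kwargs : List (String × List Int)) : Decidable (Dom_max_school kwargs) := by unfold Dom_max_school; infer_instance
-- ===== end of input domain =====

-- B builds a per-key-maxima table, reduces it to the global best separately, then finds the
-- first key attaining it (an alternative decomposition of A's single accumulator loop).


-- ===== PORT A =====
-- max(val): Python max raises on []; Pre_ excludes that, so .getD 0 is never the value used.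
def max_school (kwargs : List (String × List Int)) : String × Int :=
  kwargs.foldl
    (fun acc p =>
      let max1 := (PySem.List.max? p.2 (fun y => y)).getD 0
      if max1 > acc.2 then (p.1, max1) else acc)
    ("", 1)

-- ===== PORT B =====
def altKeyMax (v : List Int) : Int := (PySem.List.max? v (fun y => y)).getD 0

def max_school_alt (kwargs : List (String × List Int)) : String × Int :=
  let maxes := kwargs.map (fun p => (p.1, altKeyMax p.2))
  match PySem.List.max? (maxes.map Prod.snd) (fun y => y) with
  | none => ("", 1)
  | some best =>
      if best ≤ 1 then ("", 1)
      else
        match maxes.find? (fun p => p.2 == best) with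
        | some p => (p.1, best)
        | none => ("", 1)   -- unreachable: best is one of the table's values

-- ===== PRECONDITION & SPEC =====
-- Pre_ excludes inputs where some value list is empty: there Python's max(val) raises ValueError
-- (in A and in B alike), so A returns no value.
def Pre_max_school (kwargs : List (String × List Int)) : Prop :=
  (kwargs.all (fun p => !p.2.isEmpty)) = true
instance (kwargs : List (String × List Int)) : Decidable (Pre_max_school kwargs) := by unfold Pre_max_school; infer_instance
def pvWitness_max_school : (List (String × List Int)) := [("a", [2]), ("b", [1, 3])]

def Spec_max_school (kwargs : List (String × List Int)) (out : String × Int) : Prop := out = max_school_alt kwargs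
instance (kwargs : List (String × List Int)) (out : String × Int) : Decidable (Spec_max_school kwargs out) := by unfold Spec_max_school; infer_instance

-- ===== CLAIM (what is proved, stated in full; the proofs are below) =====
def Claim_equal_max_school : Prop := ∀ (kwargs : List (String × List Int)), Dom_max_school kwargs → Pre_max_school kwargs → Spec_max_school kwargs (max_school kwargs)

-- ===== LEMMAS AND PROOFS =====

theorem foldl_max_init (ms : List Int) : ∀ a b : Int, ms.foldl max (max a b) = max a (ms.foldl max b) := by
  induction ms with
  | nil => intro a b; simp
  | cons x r ih => intro a b; simp only [List.foldl_cons, max_assoc, ih]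

-- A's loop, characterised: the result is (name,num) unless some per-key max exceeds num,
-- in which case it is the FIRST key attaining the overall maximum M, paired with M.
theorem loop_char (l : List (String × List Int)) : ∀ (name : String) (num : Int),
    l.foldl
      (fun acc p =>
        let max1 := (PySem.List.max? p.2 (fun y => y)).getD 0
        if max1 > acc.2 then (p.1, max1) else acc)
      (name, num)
    = (PySem.List.max? (l.map (fun p => altKeyMax p.2)) (fun y => y)).elim (name, num)
        (fun M =>
          if M ≤ num then (name, num)
          else (l.find? (fun p => altKeyMax p.2 == M)).elim (name, num)
                 (fun p => (p.1, M))) := by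
  induction l with
  | nil => intro name num; simp [PySem.List.max?]
  | cons h t ih =>
    intro name num
    obtain ⟨k, v⟩ := h
    rw [List.foldl_cons,
      show (let max1 := (PySem.List.max? (k, v).2 (fun y => y)).getD 0
          if max1 > (name, num).2 then ((k, v).1, max1) else (name, num))
        = if altKeyMax v > num then (k, altKeyMax v) else (name, num) from rfl,
      List.map_cons,
      show altKeyMax (k, v).2 = altKeyMax v from rfl,
      PySem.List.max?_id_cons]
    simp only [Option.elim]
    cases ht : t.map (fun p => altKeyMax p.2) with
    | nil =>
      have htnil : t = [] := List.map_eq_nil_iff.mp ht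
      subst htnil
      by_cases hc : altKeyMax v > num
      · rw [if_pos hc]
        simp only [List.foldl_nil]
        rw [if_neg (by omega), List.find?_cons_of_pos (by simp)]
      · rw [if_neg hc]
        simp only [List.foldl_nil]
        rw [if_pos (by omega)]
    | cons x r =>
      rw [List.foldl_cons,
        show r.foldl max (max (altKeyMax v) x) = max (altKeyMax v) (r.foldl max x) from
          foldl_max_init r _ x]
      by_cases hc : altKeyMax v > num
      · rw [if_pos hc, ih k (altKeyMax v), ht, PySem.List.max?_id_cons]
        simp only [Option.elim]
        by_cases h1 : r.foldl max x ≤ altKeyMax v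
        · rw [if_pos h1, max_eq_left h1, if_neg (by omega),
            List.find?_cons_of_pos (by simp)]
        · have hlt : altKeyMax v < r.foldl max x := by omega
          rw [if_neg h1, max_eq_right (le_of_lt hlt), if_neg (by omega),
            List.find?_cons_of_neg (by simp only [beq_iff_eq]; omega)]
          have hmem : r.foldl max x ∈ x :: r := by
            rcases PySem.List.foldl_max_mem r x with h | h
            · rw [h]; exact List.mem_cons_self
            · exact List.mem_cons_of_mem _ h
          have hmem2 : r.foldl max x ∈ t.map (fun p => altKeyMax p.2) := ht ▸ hmem
          obtain ⟨w, hw, hpe⟩ := List.mem_map.mp hmem2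
          cases hq : t.find? (fun p => altKeyMax p.2 == r.foldl max x) with
          | none =>
            exfalso
            have hnone := List.find?_eq_none.mp hq w hw
            simp only [beq_iff_eq] at hnone
            exact hnone (by exact hpe)
          | some q => rfl
      · rw [if_neg hc, ih name num, ht, PySem.List.max?_id_cons]
        simp only [Option.elim]
        by_cases h1 : r.foldl max x ≤ num
        · rw [if_pos h1, if_pos (max_le (le_of_not_gt hc) h1)]
        · rw [if_neg h1, max_eq_right (by omega), if_neg h1,
            List.find?_cons_of_neg (by simp only [beq_iff_eq]; omega)]

-- ===== VERDICT (by name: the statement is the Claim_ definition above) =====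
theorem max_school_spec : Claim_equal_max_school := by
  intro kwargs _ _
  unfold Spec_max_school max_school max_school_alt
  simp only []
  rw [loop_char,
    show (kwargs.map (fun p => (p.1, altKeyMax p.2))).map Prod.snd
        = kwargs.map (fun p => altKeyMax p.2) from by simp]
  cases hM : PySem.List.max? (kwargs.map (fun p => altKeyMax p.2)) (fun y => y) with
  | none => rfl
  | some M =>
    by_cases h1 : M ≤ 1
    · simp [h1]
    · simp only [if_neg h1]
      rw [List.find?_map,
        show ((fun (p : String × Int) => p.2 == M) ∘ (fun (p : String × List Int) => (p.1, altKeyMax p.2)))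
            = (fun p => altKeyMax p.2 == M) from by funext p; simp [Function.comp]]
      cases hf : kwargs.find? (fun p => altKeyMax p.2 == M) with
      | none => simp [h1, hf]
      | some p => simp [hf, h1]
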